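-- pv_equiv track=rewrite | github.com/yiyan023/Data-Structures | Formation/Edge List (DFS).py | sumNodes
-- ===== SOURCE A (Python) =====
-- from collections import defaultdict
--
-- def sumNodes(vertexList: list, edgeList: list, startNode: int):
--     if startNode not in vertexList:
--         return 0
--
--     neighbours = defaultdict(list)
--     seen = set()
--
--     for s, e in edgeList:
--         neighbours[s].append(e)
--         neighbours[e].append(s)
--
--     def dfs(node):
--         if node in seen:
--             return 0
--
--         res = node
--         seen.add(node)
--
--         for neigh in neighbours[node]:
--             if neigh not in seen:
--                 res += dfs(neigh)
--                 seen.add(neigh)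
--
--         return res
--
--     return dfs(startNode)
-- ===== SOURCE B (Python) =====
-- from collections import defaultdict
--
-- def sumNodes(vertexList: list, edgeList: list, startNode: int):
--     if startNode not in vertexList:
--         return 0
--
--     adj = defaultdict(list)
--     for s, e in edgeList:
--         adj[s].append(e)
--         adj[e].append(s)
--
--     seen = set()
--     total = 0
--     stack = [startNode]
--     while stack:
--         node = stack.pop()
--         if node in seen:
--             continue
--         seen.add(node)
--         total += node
--         stack.extend(reversed(adj[node]))
--     return total
-- ===== Notes on version B (the rewrite author's own statement) =====
-- stated objective: alternative
-- what changed: The recursive dfs helper (implicit call stack, per-call neighbour loop) is replaced by an iterative traversal with an explicit stack that pops a node, skips it if seen, otherwise marks it, adds it to a running total and pushes its neighbours.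
import Mathlib
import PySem

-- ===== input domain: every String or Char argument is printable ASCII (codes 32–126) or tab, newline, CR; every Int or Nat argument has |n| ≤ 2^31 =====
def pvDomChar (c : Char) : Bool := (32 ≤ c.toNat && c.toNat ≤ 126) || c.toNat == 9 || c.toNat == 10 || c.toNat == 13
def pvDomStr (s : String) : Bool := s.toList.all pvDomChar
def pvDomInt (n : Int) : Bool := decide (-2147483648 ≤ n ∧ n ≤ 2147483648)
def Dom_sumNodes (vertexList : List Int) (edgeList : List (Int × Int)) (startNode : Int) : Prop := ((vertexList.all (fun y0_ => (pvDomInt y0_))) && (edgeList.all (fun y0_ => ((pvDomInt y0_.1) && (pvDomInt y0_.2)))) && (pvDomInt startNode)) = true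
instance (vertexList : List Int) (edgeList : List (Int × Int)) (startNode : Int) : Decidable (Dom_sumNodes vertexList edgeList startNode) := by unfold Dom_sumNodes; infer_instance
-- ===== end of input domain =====

-- B replaces A's recursive DFS with an iterative explicit-stack traversal (same O(V+E) cost);
-- the sum of a connected component does not depend on visiting order, which is what is proved here.

-- ===== PORT A =====

-- the defaultdict(list) adjacency build: neighbours[s].append(e); neighbours[e].append(s)
def buildAdj (edgeList : List (Int × Int)) : PySem.Dict Int (List Int) :=
  edgeList.foldl
    (fun d p => (d.modify p.1 [] (fun l => l ++ [p.2])).modify p.2 [] (fun l => l ++ [p.1]))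
    PySem.Dict.empty

-- startNode and every edge endpoint: a superset of every node the traversals can touch
-- (used only as a fuel bound for the totality guards of the two ports)
def nodesUniv (edgeList : List (Int × Int)) (startNode : Int) : List Int :=
  startNode :: edgeList.flatMap (fun p => [p.1, p.2])

-- body of A's 'for neigh in neighbours[node]: if neigh not in seen: res += dfs(neigh); seen.add(neigh)'
def stepG (_adj : PySem.Dict Int (List Int)) (dfs : Int → PySem.Set Int → Int × PySem.Set Int)
    (acc : Int × PySem.Set Int) (neigh : Int) : Int × PySem.Set Int :=
  if PySem.Set.contains acc.2 neigh then acc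
  else
    let p := dfs neigh acc.2
    (acc.1 + p.1, PySem.Set.add p.2 neigh)

-- A's recursive dfs, state-passing (seen is threaded), with a fuel totality guard that is never
-- exhausted when fuel exceeds the number of distinct reachable nodes (proved below)
def dfsA (adj : PySem.Dict Int (List Int)) : Nat → Int → PySem.Set Int → Int × PySem.Set Int
  | 0, _, seen => (0, seen)
  | fuel + 1, node, seen =>
    if PySem.Set.contains seen node then (0, seen)
    else
      (adj.getD node []).foldl (stepG adj (dfsA adj fuel)) (node, PySem.Set.add seen node)

def sumNodes (vertexList : List Int) (edgeList : List (Int × Int)) (startNode : Int) : Int :=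
  if vertexList.contains startNode = false then 0
  else
    let neighbours := buildAdj edgeList
    (dfsA neighbours ((nodesUniv edgeList startNode).length + 1) startNode PySem.Set.empty).1

-- ===== PORT B =====

-- same adjacency build as in Source B
def buildAdjB (edgeList : List (Int × Int)) : PySem.Dict Int (List Int) :=
  edgeList.foldl
    (fun d p => (d.modify p.1 [] (fun l => l ++ [p.2])).modify p.2 [] (fun l => l ++ [p.1]))
    PySem.Dict.empty

-- the set of nodes of univ not yet seen, and the loop potential Φ = |stack| + Σ_{unseen x} (1 + deg x):
-- Φ bounds the number of remaining iterations of Source B's while loop, and is used as B's fuel guard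
def unseenSet (univ : List Int) (seen : PySem.Set Int) : Finset Int :=
  univ.toFinset.filter (fun x => PySem.Set.contains seen x = false)

def phi (adj : PySem.Dict Int (List Int)) (univ : List Int) (stack : List Int)
    (seen : PySem.Set Int) : Nat :=
  stack.length + ∑ x ∈ unseenSet univ seen, (1 + (adj.getD x []).length)

-- Source B's while loop; the stack is modelled head-as-top, so 'pop()' takes the head and
-- 'extend(reversed(adj[node]))' prepends adj[node] in order; fuel is a totality guard only
def runB (adj : PySem.Dict Int (List Int)) : Nat → List Int → PySem.Set Int → Int → Int
  | 0, _, _, total => total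
  | _ + 1, [], _, total => total
  | fuel + 1, node :: rest, seen, total =>
    if PySem.Set.contains seen node then runB adj fuel rest seen total
    else runB adj fuel (adj.getD node [] ++ rest) (PySem.Set.add seen node) (total + node)

def sumNodes_alt (vertexList : List Int) (edgeList : List (Int × Int)) (startNode : Int) : Int :=
  if vertexList.contains startNode = false then 0
  else
    let adj := buildAdjB edgeList
    runB adj (phi adj (nodesUniv edgeList startNode) [startNode] PySem.Set.empty)
      [startNode] PySem.Set.empty 0

-- ===== PRECONDITION & SPEC =====
def Spec_sumNodes (vertexList : List Int) (edgeList : List (Int × Int)) (startNode : Int) (out : Int) : Prop := out = sumNodes_alt vertexList edgeList startNode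
instance (vertexList : List Int) (edgeList : List (Int × Int)) (startNode : Int) (out : Int) : Decidable (Spec_sumNodes vertexList edgeList startNode out) := by unfold Spec_sumNodes; infer_instance

-- ===== CLAIM (what is proved, stated in full; the proofs are below) =====
def Claim_equal_sumNodes : Prop := ∀ (vertexList : List Int) (edgeList : List (Int × Int)) (startNode : Int), Dom_sumNodes vertexList edgeList startNode → Spec_sumNodes vertexList edgeList startNode (sumNodes vertexList edgeList startNode)

-- ===== LEMMAS AND PROOFS =====

-- A's inner fold, started from accumulator (0, seen)
def foldG (adj : PySem.Dict Int (List Int)) (g : Nat) (ns : List Int) (seen : PySem.Set Int) :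
    Int × PySem.Set Int :=
  ns.foldl (stepG adj (dfsA adj g)) (0, seen)

theorem containsT (s : PySem.Set Int) (x : Int) (h : x ∈ s) :
    PySem.Set.contains s x = true := (PySem.Set.contains_iff s x).2 h

theorem containsF (s : PySem.Set Int) (x : Int) (h : x ∉ s) :
    PySem.Set.contains s x = false := by
  cases hh : PySem.Set.contains s x
  · rfl
  · exact absurd ((PySem.Set.contains_iff s x).1 hh) h

theorem iteT {α : Type} {b : Bool} (h : b = true) (x y : α) : (if b then x else y) = x := by
  subst h; rfl

theorem iteF {α : Type} {b : Bool} (h : b = false) (x y : α) : (if b then x else y) = y := by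
  subst h; rfl

theorem stepG_pos (adj : PySem.Dict Int (List Int)) (dfs : Int → PySem.Set Int → Int × PySem.Set Int)
    (acc : Int × PySem.Set Int) (m : Int) (h : m ∈ acc.2) : stepG adj dfs acc m = acc := by
  unfold stepG; rw [iteT (containsT _ _ h)]

theorem stepG_neg (adj : PySem.Dict Int (List Int)) (dfs : Int → PySem.Set Int → Int × PySem.Set Int)
    (acc : Int × PySem.Set Int) (m : Int) (h : m ∉ acc.2) :
    stepG adj dfs acc m = (acc.1 + (dfs m acc.2).1, PySem.Set.add (dfs m acc.2).2 m) := by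
  unfold stepG; rw [iteF (containsF _ _ h)]

theorem dfsA_succ_pos (adj : PySem.Dict Int (List Int)) (f : Nat) (node : Int)
    (seen : PySem.Set Int) (h : node ∈ seen) : dfsA adj (f + 1) node seen = (0, seen) := by
  simp only [dfsA]; rw [iteT (containsT _ _ h)]

theorem dfsA_succ_neg (adj : PySem.Dict Int (List Int)) (f : Nat) (node : Int)
    (seen : PySem.Set Int) (h : node ∉ seen) :
    dfsA adj (f + 1) node seen
      = (adj.getD node []).foldl (stepG adj (dfsA adj f)) (node, PySem.Set.add seen node) := by
  simp only [dfsA]; rw [iteF (containsF _ _ h)]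

theorem runB_succ_pos (adj : PySem.Dict Int (List Int)) (f : Nat) (node : Int) (rest : List Int)
    (seen : PySem.Set Int) (total : Int) (h : node ∈ seen) :
    runB adj (f + 1) (node :: rest) seen total = runB adj f rest seen total := by
  simp only [runB]; rw [iteT (containsT _ _ h)]

theorem runB_succ_neg (adj : PySem.Dict Int (List Int)) (f : Nat) (node : Int) (rest : List Int)
    (seen : PySem.Set Int) (total : Int) (h : node ∉ seen) :
    runB adj (f + 1) (node :: rest) seen total
      = runB adj f (adj.getD node [] ++ rest) (PySem.Set.add seen node) (total + node) := by
  simp only [runB]; rw [iteF (containsF _ _ h)]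

theorem runB_nil (adj : PySem.Dict Int (List Int)) (f : Nat) (seen : PySem.Set Int) (total : Int) :
    runB adj f [] seen total = total := by
  cases f <;> simp [runB]

theorem mem_unseenSet (univ : List Int) (seen : PySem.Set Int) (x : Int) :
    x ∈ unseenSet univ seen ↔ x ∈ univ ∧ x ∉ seen := by
  simp [unseenSet, Finset.mem_filter, List.mem_toFinset]

theorem unseenSet_subset (univ : List Int) (seen seen' : PySem.Set Int)
    (h : ∀ y, y ∈ seen → y ∈ seen') : unseenSet univ seen' ⊆ unseenSet univ seen := by
  intro y hy
  rw [mem_unseenSet] at hy ⊢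
  exact ⟨hy.1, fun hmem => hy.2 (h y hmem)⟩

theorem unseenSet_add (univ : List Int) (seen : PySem.Set Int) (x : Int) :
    unseenSet univ (PySem.Set.add seen x) = (unseenSet univ seen).erase x := by
  ext y
  simp only [mem_unseenSet, Finset.mem_erase, PySem.Set.mem_add]
  tauto

theorem phi_cons (adj : PySem.Dict Int (List Int)) (univ : List Int) (n : Int)
    (rest : List Int) (seen : PySem.Set Int) :
    phi adj univ (n :: rest) seen = phi adj univ rest seen + 1 := by
  simp [phi, List.length_cons]
  omega

theorem phi_step (adj : PySem.Dict Int (List Int)) (univ : List Int) (n : Int)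
    (rest : List Int) (seen : PySem.Set Int) (hU : n ∈ univ) (hn : n ∉ seen) :
    phi adj univ (adj.getD n [] ++ rest) (PySem.Set.add seen n) + 2
      = phi adj univ (n :: rest) seen := by
  have hmem : n ∈ unseenSet univ seen := (mem_unseenSet univ seen n).2 ⟨hU, hn⟩
  have hsum : (fun x => 1 + (adj.getD x []).length) n
        + ∑ x ∈ (unseenSet univ seen).erase n, (fun x => 1 + (adj.getD x []).length) x
      = ∑ x ∈ unseenSet univ seen, (fun x => 1 + (adj.getD x []).length) x :=
    Finset.add_sum_erase _ (fun x => 1 + (adj.getD x []).length) hmem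
  simp only [] at hsum
  simp only [phi, unseenSet_add, List.length_append, List.length_cons]
  omega

-- the seen set only grows
theorem dfsA_mono (adj : PySem.Dict Int (List Int)) :
    ∀ (fuel : Nat) (node : Int) (seen : PySem.Set Int) (x : Int),
      x ∈ seen → x ∈ (dfsA adj fuel node seen).2 := by
  intro fuel
  induction fuel with
  | zero => intro node seen x hx; simpa [dfsA] using hx
  | succ f ih =>
    intro node seen x hx
    by_cases h : node ∈ seen
    · rw [dfsA_succ_pos adj f node seen h]; exact hx
    · rw [dfsA_succ_neg adj f node seen h]
      have hx1 : x ∈ PySem.Set.add seen node := by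
        rw [PySem.Set.mem_add]; exact Or.inl hx
      have aux : ∀ (ns : List Int) (acc : Int × PySem.Set Int), x ∈ acc.2 →
          x ∈ (ns.foldl (stepG adj (dfsA adj f)) acc).2 := by
        intro ns
        induction ns with
        | nil => intro acc hcc; simpa using hcc
        | cons m ns' ihns =>
          intro acc hacc
          simp only [List.foldl_cons]
          apply ihns
          by_cases hc : m ∈ acc.2
          · rw [stepG_pos adj _ acc m hc]; exact hacc
          · rw [stepG_neg adj _ acc m hc]
            rw [PySem.Set.mem_add]
            exact Or.inl (ih m acc.2 x hacc)
      exact aux _ _ hx1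

theorem foldG_mono (adj : PySem.Dict Int (List Int)) (g : Nat) :
    ∀ (ns : List Int) (acc : Int × PySem.Set Int) (x : Int), x ∈ acc.2 →
      x ∈ (ns.foldl (stepG adj (dfsA adj g)) acc).2 := by
  intro ns
  induction ns with
  | nil => intro acc x h; simpa using h
  | cons m ns' ihns =>
    intro acc x hacc
    simp only [List.foldl_cons]
    apply ihns
    by_cases hc : m ∈ acc.2
    · rw [stepG_pos adj _ acc m hc]; exact hacc
    · rw [stepG_neg adj _ acc m hc]
      rw [PySem.Set.mem_add]
      exact Or.inl (dfsA_mono adj g m acc.2 x hacc)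

-- B's result does not depend on the fuel once it exceeds the potential Φ
theorem runB_fuel (adj : PySem.Dict Int (List Int)) (univ : List Int)
    (Hadj : ∀ x m, m ∈ adj.getD x [] → m ∈ univ) :
    ∀ (f1 f2 : Nat) (stack : List Int) (seen : PySem.Set Int) (total : Int),
      (∀ x ∈ stack, x ∈ univ) → phi adj univ stack seen ≤ f1 → phi adj univ stack seen ≤ f2 →
      runB adj f1 stack seen total = runB adj f2 stack seen total := by
  intro f1
  induction f1 with
  | zero =>
    intro f2 stack seen total _ h1 _
    have hstack : stack = [] := by
      cases stack with
      | nil => rfl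
      | cons n rest => rw [phi_cons] at h1; omega
    subst hstack
    rw [runB_nil, runB_nil]
  | succ a ih =>
    intro f2 stack seen total hst h1 h2
    cases stack with
    | nil => rw [runB_nil, runB_nil]
    | cons node rest =>
      obtain ⟨b, rfl⟩ : ∃ b, f2 = b + 1 := ⟨f2 - 1, by rw [phi_cons] at h2; omega⟩
      by_cases hmem : node ∈ seen
      · rw [runB_succ_pos adj a node rest seen total hmem,
            runB_succ_pos adj b node rest seen total hmem]
        exact ih b rest seen total (fun x hx => hst x (by simp [hx]))
          (by rw [phi_cons] at h1; omega) (by rw [phi_cons] at h2; omega)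
      · rw [runB_succ_neg adj a node rest seen total hmem,
            runB_succ_neg adj b node rest seen total hmem]
        have hU : node ∈ univ := hst node (by simp)
        have hphi := phi_step adj univ node rest seen hU hmem
        apply ih
        · intro x hx
          rcases List.mem_append.1 hx with hx | hx
          · exact Hadj node x hx
          · exact hst x (by simp [hx])
        · omega
        · omega

-- the accumulator of A's fold is additive in its first component
theorem foldG_shift (adj : PySem.Dict Int (List Int)) (g : Nat) :
    ∀ (ns : List Int) (r0 : Int) (s : PySem.Set Int),
      ns.foldl (stepG adj (dfsA adj g)) (r0, s)
        = (r0 + (ns.foldl (stepG adj (dfsA adj g)) (0, s)).1,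
           (ns.foldl (stepG adj (dfsA adj g)) (0, s)).2) := by
  intro ns
  induction ns with
  | nil => intro r0 s; simp
  | cons m ns' ihns =>
    intro r0 s
    simp only [List.foldl_cons]
    by_cases hc : m ∈ s
    · rw [stepG_pos adj _ (r0, s) m hc, stepG_pos adj _ (0, s) m hc, ihns]
    · rw [stepG_neg adj _ (r0, s) m hc, stepG_neg adj _ (0, s) m hc]
      simp only []
      rw [ihns, ihns (0 + (dfsA adj g m s).1)]
      simp only [Prod.mk.injEq]
      exact ⟨by ring, trivial⟩

-- the simulation: running B's loop on ns ++ rest equals first folding A's dfs over ns, then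
-- continuing B's loop on rest with the resulting seen set and accumulated sum
theorem simF (adj : PySem.Dict Int (List Int)) (univ : List Int)
    (Hadj : ∀ x m, m ∈ adj.getD x [] → m ∈ univ) :
    ∀ (k : Nat) (ns : List Int), ∀ (rest : List Int) (seen : PySem.Set Int) (total : Int)
      (f g h : Nat),
      (∀ x ∈ ns, x ∈ univ) → (∀ x ∈ rest, x ∈ univ) →
      (unseenSet univ seen).card ≤ k → k < g →
      phi adj univ (ns ++ rest) seen ≤ f →
      phi adj univ rest (foldG adj g ns seen).2 ≤ h →
      runB adj f (ns ++ rest) seen total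
        = runB adj h rest (foldG adj g ns seen).2 (total + (foldG adj g ns seen).1) := by
  intro k
  induction k using Nat.strong_induction_on with
  | _ k IHk =>
    intro ns
    induction ns with
    | nil =>
      intro rest seen total f g h _ hrest hcard hg hf hh
      simp only [foldG, List.foldl_nil, List.nil_append] at hf hh ⊢
      rw [add_zero]
      exact runB_fuel adj univ Hadj f h rest seen total hrest hf hh
    | cons m ns' IHns =>
      intro rest seen total f g h hns hrest hcard hg hf hh
      have hmU : m ∈ univ := hns m (by simp)
      obtain ⟨a, rfl⟩ : ∃ a, f = a + 1 :=
        ⟨f - 1, by rw [List.cons_append, phi_cons] at hf; omega⟩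
      by_cases hc : m ∈ seen
      · -- m already seen: both sides skip it
        have hfold : foldG adj g (m :: ns') seen = foldG adj g ns' seen := by
          rw [foldG, foldG, List.foldl_cons, stepG_pos adj _ (0, seen) m hc]
        rw [hfold] at hh ⊢
        rw [List.cons_append, runB_succ_pos adj a m (ns' ++ rest) seen total hc]
        exact IHns rest seen total a g h (fun x hx => hns x (by simp [hx])) hrest hcard hg
          (by rw [List.cons_append, phi_cons] at hf; omega) hh
      · have hmUn : m ∈ unseenSet univ seen := (mem_unseenSet univ seen m).2 ⟨hmU, hc⟩
        have hk1 : 1 ≤ k := by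
          have := Finset.card_pos.2 ⟨m, hmUn⟩
          omega
        obtain ⟨g0, rfl⟩ : ∃ g0, g = g0 + 1 := ⟨g - 1, by omega⟩
        set R1 := (foldG adj g0 (adj.getD m []) (PySem.Set.add seen m)).1 with hR1
        set S1 := (foldG adj g0 (adj.getD m []) (PySem.Set.add seen m)).2 with hS1
        have hdfs : dfsA adj (g0 + 1) m seen = (m + R1, S1) := by
          rw [dfsA_succ_neg adj g0 m seen hc, foldG_shift]
          rfl
        have hmS1 : m ∈ S1 := by
          apply foldG_mono
          rw [PySem.Set.mem_add]; exact Or.inr rfl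
        have hstep1 : stepG adj (dfsA adj (g0 + 1)) (0, seen) m = (m + R1, S1) := by
          rw [stepG_neg adj _ (0, seen) m hc]
          simp only []
          rw [hdfs]
          simp [PySem.Set.add_of_mem hmS1]
        have hfold : foldG adj (g0 + 1) (m :: ns') seen
            = ((m + R1) + (foldG adj (g0 + 1) ns' S1).1, (foldG adj (g0 + 1) ns' S1).2) := by
          rw [foldG, List.foldl_cons, hstep1, foldG_shift]
          rfl
        have hcard1 : (unseenSet univ (PySem.Set.add seen m)).card < k := by
          rw [unseenSet_add, Finset.card_erase_of_mem hmUn]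
          have := Finset.card_pos.2 ⟨m, hmUn⟩
          omega
        -- step 1: B's loop consumes m and, by the outer induction, the whole of adj m
        have step1 := IHk (unseenSet univ (PySem.Set.add seen m)).card hcard1
          (adj.getD m []) (ns' ++ rest) (PySem.Set.add seen m) (total + m)
          a g0 (phi adj univ (ns' ++ rest) S1)
          (fun x hx => Hadj m x hx)
          (fun x hx => by
            rcases List.mem_append.1 hx with hx | hx
            · exact hns x (by simp [hx])
            · exact hrest x hx)
          le_rfl (by omega)
          (by
            have hphi := phi_step adj univ m (ns' ++ rest) seen hmU hc
            rw [List.cons_append] at hf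
            omega)
          le_rfl
        -- step 2: continue with ns' from the grown seen set S1
        have hS1sub : ∀ y, y ∈ seen → y ∈ S1 := by
          intro y hy
          apply foldG_mono
          rw [PySem.Set.mem_add]; exact Or.inl hy
        have hcardS1 : (unseenSet univ S1).card ≤ k :=
          le_trans (Finset.card_le_card (unseenSet_subset univ seen S1 hS1sub)) hcard
        have step2 := IHns rest S1 (total + m + R1)
          (phi adj univ (ns' ++ rest) S1) (g0 + 1) h
          (fun x hx => hns x (by simp [hx])) hrest hcardS1 hg
          le_rfl
          (by rw [hfold] at hh; exact hh)
        rw [List.cons_append, runB_succ_neg adj a m (ns' ++ rest) seen total hc]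
        rw [step1, step2, hfold]
        congr 1
        ring

-- every value stored in the adjacency dict satisfies P if every edge endpoint does
theorem buildAdj_vals (P : Int → Prop) :
    ∀ (es : List (Int × Int)) (d : PySem.Dict Int (List Int)),
      (∀ p ∈ es, P p.1 ∧ P p.2) → (∀ x m, m ∈ d.getD x [] → P m) →
      ∀ x m,
        m ∈ (es.foldl
          (fun d p => (d.modify p.1 [] (fun l => l ++ [p.2])).modify p.2 [] (fun l => l ++ [p.1]))
          d).getD x [] → P m := by
  intro es
  induction es with
  | nil => intro d _ hd x m hm; exact hd x m hm
  | cons p es' ih =>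
    intro d hes hd x m hm
    refine ih _ (fun q hq => hes q (by simp [hq])) ?_ x m hm
    intro x' m' hm'
    rw [PySem.Dict.getD_modify] at hm'
    by_cases h2 : x' = p.2
    · rw [if_pos h2] at hm'
      rw [PySem.Dict.getD_modify] at hm'
      rcases List.mem_append.1 hm' with hm' | hm'
      · by_cases h1 : p.2 = p.1
        · rw [if_pos h1] at hm'
          rcases List.mem_append.1 hm' with hm' | hm'
          · exact hd p.1 m' hm'
          · simp only [List.mem_singleton] at hm'
            subst hm'
            exact (hes p (by simp)).2
        · rw [if_neg h1] at hm'
          exact hd p.2 m' hm'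
      · simp only [List.mem_singleton] at hm'
        subst hm'
        exact (hes p (by simp)).1
    · rw [if_neg h2, PySem.Dict.getD_modify] at hm'
      by_cases h1 : x' = p.1
      · rw [if_pos h1] at hm'
        rcases List.mem_append.1 hm' with hm' | hm'
        · exact hd p.1 m' hm'
        · simp only [List.mem_singleton] at hm'
          subst hm'
          exact (hes p (by simp)).2
      · rw [if_neg h1] at hm'
        exact hd x' m' hm'

theorem Hadj_build (edgeList : List (Int × Int)) (startNode : Int) :
    ∀ x m, m ∈ (buildAdj edgeList).getD x [] → m ∈ nodesUniv edgeList startNode := by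
  apply buildAdj_vals (P := fun m => m ∈ nodesUniv edgeList startNode)
  · intro p hp
    constructor
    · simp only [nodesUniv, List.mem_cons, List.mem_flatMap]
      exact Or.inr ⟨p, hp, by simp⟩
    · simp only [nodesUniv, List.mem_cons, List.mem_flatMap]
      exact Or.inr ⟨p, hp, by simp⟩
  · intro x m hm
    simp [PySem.Dict.getD_empty] at hm

-- ===== VERDICT (by name: the statement is the Claim_ definition above) =====
theorem sumNodes_spec : Claim_equal_sumNodes := by
  unfold Claim_equal_sumNodes
  intro vertexList edgeList startNode _dom
  unfold Spec_sumNodes sumNodes sumNodes_alt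
  by_cases hmem : startNode ∈ vertexList
  · have hg : ¬ (vertexList.contains startNode = false) := by simp [hmem]
    rw [if_neg hg, if_neg hg]
    have hBA : buildAdjB = buildAdj := rfl
    rw [hBA]
    set adj := buildAdj edgeList with hadj
    set univ := nodesUniv edgeList startNode with huniv
    have Hadj : ∀ x m, m ∈ adj.getD x [] → m ∈ univ := Hadj_build edgeList startNode
    have hsnU : startNode ∈ univ := by rw [huniv]; simp [nodesUniv]
    set k := (unseenSet univ PySem.Set.empty).card with hk
    have hkbound : k < univ.length + 1 := by
      have h1 : (unseenSet univ PySem.Set.empty).card ≤ univ.toFinset.card :=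
        Finset.card_le_card (Finset.filter_subset _ _)
      have h2 : univ.toFinset.card ≤ univ.length := univ.toFinset_card_le
      omega
    have hsim := simF adj univ Hadj k [startNode] []
      PySem.Set.empty 0
      (phi adj univ [startNode] PySem.Set.empty) (univ.length + 1)
      (phi adj univ [] (foldG adj (univ.length + 1) [startNode] PySem.Set.empty).2)
      (by intro x hx; simp only [List.mem_singleton] at hx; subst hx; exact hsnU)
      (by intro x hx; simp at hx)
      le_rfl hkbound
      (by simp) le_rfl
    simp only [List.append_nil] at hsim
    rw [hsim, runB_nil]
    have hsE : startNode ∉ (PySem.Set.empty : PySem.Set Int) := by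
      simp [PySem.Set.empty]
    have hfold : (foldG adj (univ.length + 1) [startNode] PySem.Set.empty).1
        = 0 + (dfsA adj (univ.length + 1) startNode PySem.Set.empty).1 := by
      rw [foldG, List.foldl_cons, List.foldl_nil, stepG_neg adj _ (0, PySem.Set.empty) startNode hsE]
    rw [hfold]
    ring
  · have hg : vertexList.contains startNode = false := by simp [hmem]
    rw [if_pos hg, if_pos hg]
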